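-- pv_equiv track=rewrite | github.com/Arsen1302/Code-copy-detector | TestData/solutions/problem_1531_5.py | solution_1531_5
-- ===== SOURCE A (Python) =====
-- def solution_1531_5(s: str) -> int:
--     ans = n0 = n1 = n01 = n10 = 0
--     for ch in s:
--         if ch == '0':
--             ans += n01
--             n10 += n1
--             n0 += 1
--         else:
--             ans += n10
--             n01 += n0
--             n1 += 1
--     return ans
-- ===== SOURCE B (Python) =====
-- def solution_1531_5(s: str) -> int:
--     total0 = sum(1 for ch in s if ch == '0')
--     total1 = len(s) - total0
--     ans = z = o = 0
--     for ch in s: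
--         if ch == '0':
--             ans += o * (total1 - o)
--             z += 1
--         else:
--             ans += z * (total0 - z)
--             o += 1
--     return ans
-- ===== Notes on version B (the rewrite author's own statement) =====
-- stated objective: alternative
-- what changed: Replaces A's incremental pair-count state machine (n01/n10 running pair counts) with a pivot-based formula: precompute total zero/one counts, then for each middle character multiply the matching before- and after-counts.
import Mathlib
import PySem

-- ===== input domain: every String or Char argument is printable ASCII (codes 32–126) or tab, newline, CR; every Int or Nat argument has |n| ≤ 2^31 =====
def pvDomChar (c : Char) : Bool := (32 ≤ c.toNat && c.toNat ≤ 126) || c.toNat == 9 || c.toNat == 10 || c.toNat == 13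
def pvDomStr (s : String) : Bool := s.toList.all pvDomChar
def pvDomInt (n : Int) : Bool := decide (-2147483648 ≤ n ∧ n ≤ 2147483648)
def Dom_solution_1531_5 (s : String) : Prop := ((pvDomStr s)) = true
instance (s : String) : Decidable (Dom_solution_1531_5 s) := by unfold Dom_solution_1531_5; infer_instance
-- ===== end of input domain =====

-- B replaces A's incremental pair-count state machine by a pivot formula using total counts; same O(n) cost.

-- ===== PORT A =====
-- state: (ans, n0, n1, n01, n10), exactly A's variables
def solution_1531_5 (s : String) : Int :=
  (s.toList.foldl
    (fun (st : Int × Int × Int × Int × Int) ch =>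
      let (ans, n0, n1, n01, n10) := st
      if ch = '0' then (ans + n01, n0 + 1, n1, n01, n10 + n1)
      else (ans + n10, n0, n1 + 1, n01 + n0, n10))
    (0, 0, 0, 0, 0)).1

-- ===== PORT B =====
def solution_1531_5_alt (s : String) : Int :=
  let total0 : Int := s.toList.foldl (fun acc ch => if ch = '0' then acc + 1 else acc) 0
  let total1 : Int := (s.toList.length : Int) - total0
  (s.toList.foldl
    (fun (st : Int × Int × Int) ch =>
      let (ans, z, o) := st
      if ch = '0' then (ans + o * (total1 - o), z + 1, o)
      else (ans + z * (total0 - z), z, o + 1))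
    (0, 0, 0)).1

-- ===== PRECONDITION & SPEC =====
def Spec_solution_1531_5 (s : String) (out : Int) : Prop := out = solution_1531_5_alt s
instance (s : String) (out : Int) : Decidable (Spec_solution_1531_5 s out) := by unfold Spec_solution_1531_5; infer_instance

-- ===== CLAIM =====
def Claim_equal_solution_1531_5 : Prop := ∀ (s : String), Dom_solution_1531_5 s → Spec_solution_1531_5 s (solution_1531_5 s)

-- ===== LEMMAS AND PROOFS =====

-- counting helpers over the char list
def pvC0 : List Char → Int
  | [] => 0
  | c :: l => (if c = '0' then 1 else 0) + pvC0 l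

def pvC1 : List Char → Int
  | [] => 0
  | c :: l => (if c = '0' then 0 else 1) + pvC1 l

-- pairs (0, later non-0) and (non-0, later 0)
def pvP01 : List Char → Int
  | [] => 0
  | c :: l => (if c = '0' then pvC1 l else 0) + pvP01 l

def pvP10 : List Char → Int
  | [] => 0
  | c :: l => (if c = '0' then 0 else pvC0 l) + pvP10 l

-- alternating triples (010 + 101)
def pvT : List Char → Int
  | [] => 0
  | c :: l => (if c = '0' then pvP10 l else pvP01 l) + pvT l

theorem foldA_closed (l : List Char) (ans n0 n1 n01 n10 : Int) :
    (l.foldl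
      (fun (st : Int × Int × Int × Int × Int) ch =>
        let (ans, n0, n1, n01, n10) := st
        if ch = '0' then (ans + n01, n0 + 1, n1, n01, n10 + n1)
        else (ans + n10, n0, n1 + 1, n01 + n0, n10))
      (ans, n0, n1, n01, n10)).1
    = ans + n01 * pvC0 l + n10 * pvC1 l + n0 * pvP10 l + n1 * pvP01 l + pvT l := by
  induction l generalizing ans n0 n1 n01 n10 with
  | nil => simp [pvC0, pvC1, pvP01, pvP10, pvT]
  | cons c l ih =>
    by_cases h : c = '0' <;>
      simp [List.foldl, h, ih, pvC0, pvC1, pvP01, pvP10, pvT] <;> ring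

theorem foldB_closed (l : List Char) (ans z o Z O : Int)
    (hZ : Z = z + pvC0 l) (hO : O = o + pvC1 l) :
    (l.foldl
      (fun (st : Int × Int × Int) ch =>
        let (ans, z, o) := st
        if ch = '0' then (ans + o * (O - o), z + 1, o)
        else (ans + z * (Z - z), z, o + 1))
      (ans, z, o)).1
    = ans + o * pvP01 l + z * pvP10 l + pvT l := by
  induction l generalizing ans z o with
  | nil => simp [pvP01, pvP10, pvT]
  | cons c l ih =>
    by_cases h : c = '0'
    · simp [pvC0, pvC1, h] at hZ hO
      have h1 : Z = (z + 1) + pvC0 l := by omega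
      have h2 : O = o + pvC1 l := by omega
      simp [List.foldl, h, ih _ _ _ h1 h2, pvP01, pvP10, pvT]
      have : O - o = pvC1 l := by omega
      rw [this]; ring
    · simp [pvC0, pvC1, h] at hZ hO
      have h1 : Z = z + pvC0 l := by omega
      have h2 : O = (o + 1) + pvC1 l := by omega
      simp [List.foldl, h, ih _ _ _ h1 h2, pvP01, pvP10, pvT]
      have : Z - z = pvC0 l := by omega
      rw [this]; ring

theorem count_fold (l : List Char) (acc : Int) :
    l.foldl (fun acc ch => if ch = '0' then acc + 1 else acc) acc = acc + pvC0 l := by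
  induction l generalizing acc with
  | nil => simp [pvC0]
  | cons c l ih => by_cases h : c = '0' <;> simp [List.foldl, h, ih, pvC0]; ring

theorem len_split (l : List Char) : (l.length : Int) = pvC0 l + pvC1 l := by
  induction l with
  | nil => simp [pvC0, pvC1]
  | cons c l ih =>
    by_cases h : c = '0' <;> simp [h, pvC0, pvC1, ih] <;> ring

-- ===== VERDICT =====
theorem solution_1531_5_spec : Claim_equal_solution_1531_5 := by
  intro s _
  unfold Spec_solution_1531_5 solution_1531_5 solution_1531_5_alt
  rw [count_fold, foldA_closed,
      foldB_closed s.toList 0 0 0 (0 + pvC0 s.toList) ((s.toList.length : Int) - (0 + pvC0 s.toList))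
        (by ring) (by rw [len_split]; ring)]
  ring
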